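-- pv_equiv track=rewrite | github.com/poikNplop/python-ringing-tools | plainbobsingle_tree.py | _true
-- ===== SOURCE A (Python) =====
-- def _true(rows):
--     eql, tl = [], []
--     for i in rows:
--         eql.append(str(i))
--     for line in eql:
--         if line in tl:
--             return(False)
--         tl += [line]
--     return(True)
-- ===== SOURCE B (Python) =====
-- def _true(rows):
--     keys = sorted(str(r) for r in rows)
--     return all(a != b for a, b in zip(keys, keys[1:]))
-- ===== Notes on version B (the rewrite author's own statement) =====
-- stated objective: alternative
-- what changed: B sorts the string representations of the rows once and detects a duplicate by comparing adjacent sorted keys, instead of A's growing seen-list with a linear membership scan per row.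
import Mathlib
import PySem

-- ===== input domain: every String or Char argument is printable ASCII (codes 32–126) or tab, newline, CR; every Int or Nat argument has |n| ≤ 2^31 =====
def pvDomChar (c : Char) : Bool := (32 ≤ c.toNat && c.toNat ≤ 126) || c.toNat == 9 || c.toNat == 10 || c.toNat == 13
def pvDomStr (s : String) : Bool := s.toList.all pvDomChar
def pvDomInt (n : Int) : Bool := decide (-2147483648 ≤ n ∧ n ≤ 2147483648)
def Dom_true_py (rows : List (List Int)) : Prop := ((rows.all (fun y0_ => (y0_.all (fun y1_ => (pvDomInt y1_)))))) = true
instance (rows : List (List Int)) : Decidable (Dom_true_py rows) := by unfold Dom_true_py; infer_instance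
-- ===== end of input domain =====

-- B replaces A's grow-a-list membership scan by sorting the string keys and
-- sweeping adjacent pairs for equality (objective: alternative; not measured faster).

-- shared helper: str(r) for a Python list of ints, e.g. "[1, 2]"
def rowStr (r : List Int) : String :=
  "[" ++ PySem.Str.join ", " (r.map PySem.Int.toStr) ++ "]"

-- ===== PORT A =====
-- the second loop of A: 'for line in eql: if line in tl: return False; tl += [line]'
def aLoop : List String → List String → Bool
  | [], _ => true
  | line :: rest, tl => if line ∈ tl then false else aLoop rest (tl ++ [line])

def true_py (rows : List (List Int)) : Bool :=
  let eql := rows.foldl (fun acc i => acc ++ [rowStr i]) []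
  aLoop eql []

-- ===== PORT B =====
def true_py_alt (rows : List (List Int)) : Bool :=
  let keys := PySem.List.sorted (rows.map rowStr) (fun s => s) false
  ((keys.zip (PySem.List.slice keys (some 1) none)).all (fun p => p.1 != p.2))

-- ===== PRECONDITION & SPEC =====
def Spec_true_py (rows : List (List Int)) (out : Bool) : Prop := out = true_py_alt rows
instance (rows : List (List Int)) (out : Bool) : Decidable (Spec_true_py rows out) := by unfold Spec_true_py; infer_instance

-- ===== CLAIM (what is proved, stated in full; the proofs are below) =====
def Claim_equal_true_py : Prop := ∀ (rows : List (List Int)), Dom_true_py rows → Spec_true_py rows (true_py rows)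

-- ===== LEMMAS AND PROOFS =====

-- A's membership loop decides Nodup of the remaining list relative to the seen list
lemma aLoop_eq_true_iff (l tl : List String) (h : tl.Nodup) :
    aLoop l tl = true ↔ (tl ++ l).Nodup := by
  induction l generalizing tl with
  | nil => simp [aLoop, h]
  | cons x rest ih =>
    by_cases hx : x ∈ tl
    · have hnd : ¬ (tl ++ x :: rest).Nodup := by
        intro hnd
        exact List.disjoint_of_nodup_append hnd hx List.mem_cons_self
      simp [aLoop, hx, hnd]
    · have htl' : (tl ++ [x]).Nodup :=
        List.Nodup.append h (List.nodup_singleton x)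
          (by intro a ha hb; simp at hb; subst hb; exact hx ha)
      simp only [aLoop, if_neg hx, ih _ htl']
      rw [List.append_assoc, List.singleton_append]

-- on a ≤-sorted list, no adjacent pair equal ↔ Nodup
lemma adj_all_ne_iff_nodup (l : List String) (h : l.Pairwise (· ≤ ·)) :
    ((l.zip l.tail).all (fun p => p.1 != p.2)) = true ↔ l.Nodup := by
  induction l with
  | nil => simp
  | cons a t ih =>
    cases t with
    | nil => simp
    | cons b u =>
      have hpa := List.pairwise_cons.mp h
      have hpb := List.pairwise_cons.mp hpa.2
      have ihr := ih hpa.2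
      simp only [List.tail_cons, List.zip_cons_cons, List.all_cons, Bool.and_eq_true,
        bne_iff_ne, ne_eq, List.nodup_cons] at *
      constructor
      · rintro ⟨hab, hrest⟩
        refine ⟨?_, ihr.mp hrest⟩
        intro hmem
        rcases List.mem_cons.mp hmem with h1 | h2
        · exact hab h1
        · have hba : b ≤ a := hpb.1 a h2
          have hlt : a < b := lt_of_le_of_ne (hpa.1 b List.mem_cons_self) hab
          exact (not_le_of_gt hlt) hba
      · rintro ⟨hnm, hrest⟩
        exact ⟨fun he => hnm (he ▸ List.mem_cons_self), ihr.mpr hrest⟩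

-- ===== VERDICT (by name: the statement is the Claim_ definition above) =====
theorem true_py_spec : Claim_equal_true_py := by
  intro rows _
  unfold Spec_true_py true_py true_py_alt
  simp only [PySem.List.foldl_append_singleton_eq_map, List.nil_append,
    PySem.List.slice_from_one]
  set eql := rows.map rowStr with heql
  set keys := PySem.List.sorted eql (fun s => s) false with hkeys
  have hperm : keys.Perm eql := PySem.List.sorted_perm _ _ _
  have hpw : keys.Pairwise (· ≤ ·) := by
    simpa using PySem.List.sorted_pairwise eql (fun s => s)
  rw [Bool.eq_iff_iff, aLoop_eq_true_iff eql [] List.nodup_nil,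
      adj_all_ne_iff_nodup keys hpw, List.nil_append]
  exact (hperm.nodup_iff).symm
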